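-- pv_equiv track=rewrite | github.com/algebrabool472-cpu/Proyecto | procesador.py | xor_binario
-- ===== SOURCE A (Python) =====
-- def validar_binario(binario):
--     chars = binario.split()
--     for b in chars:
--         if len(b) != 8 or not all(c in "01" for c in b):
--             return False
--     return True
--
-- def xor_binario(binario, clave="10101010"):
--     if not validar_binario(binario):
--         return "Error: el binario no es válido."
--     if len(clave) != 8 or not all(c in "01" for c in clave):
--         return "Error: la clave XOR debe ser de 8 bits."
--     chars = binario.split()
--     resultado = []
--     for b in chars:
--         xor_val = int(b, 2) ^ int(clave, 2)
--         resultado.append(format(xor_val, '08b'))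
--     return ' '.join(resultado)
-- ===== SOURCE B (Python) =====
-- def xor_binario(binario, clave="10101010"):
--     chars = binario.split()
--     for b in chars:
--         if len(b) != 8 or any(c not in "01" for c in b):
--             return "Error: el binario no es válido."
--     if len(clave) != 8 or any(c not in "01" for c in clave):
--         return "Error: la clave XOR debe ser de 8 bits."
--     return ' '.join(''.join('1' if x != y else '0' for x, y in zip(b, clave))
--                     for b in chars)
-- ===== Notes on version B (the rewrite author's own statement) =====
-- stated objective: idiomatic
-- what changed: B XORs each 8-bit group character-by-character with zip over the key (emitting '1' where the bits differ) instead of converting to int with int(b,2), integer ^, and re-formatting the integer back to an 8-digit binary string; validation is inlined instead of a helper.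
import Mathlib
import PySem

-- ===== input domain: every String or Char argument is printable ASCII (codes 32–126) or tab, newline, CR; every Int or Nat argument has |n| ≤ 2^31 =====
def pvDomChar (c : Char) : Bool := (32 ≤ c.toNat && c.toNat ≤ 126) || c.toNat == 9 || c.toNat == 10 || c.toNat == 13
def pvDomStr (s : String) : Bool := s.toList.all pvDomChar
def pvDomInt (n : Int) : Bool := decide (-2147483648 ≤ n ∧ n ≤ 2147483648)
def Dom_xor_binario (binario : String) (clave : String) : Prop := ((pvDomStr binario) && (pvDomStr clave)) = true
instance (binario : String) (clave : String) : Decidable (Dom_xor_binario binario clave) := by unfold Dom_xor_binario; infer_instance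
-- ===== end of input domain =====

-- B XORs each 8-bit group character-by-character with the key instead of int(b,2) ^ int(clave,2) re-formatted back to an 8-digit binary string (idiomatic; same guards and messages).


-- ===== PORT A =====
-- c in "01"
def pvBitChar (c : Char) : Bool := c == '0' || c == '1'

-- the for-loop of validar_binario with its early return False
def pvValidarLoop : List String → Bool
  | [] => true
  | b :: rest =>
    if b.toList.length != 8 || !(b.toList.all pvBitChar) then false
    else pvValidarLoop rest

def validar_binario (binario : String) : Bool :=
  pvValidarLoop (PySem.Str.split₀ binario)

-- int(s, 2); exact for the validated strings of '0'/'1' on which A uses it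
def pvIntBase2 (s : String) : Nat :=
  s.toList.foldl (fun a c => 2 * a + (if c == '1' then 1 else 0)) 0

-- format(v, '08b'); exact for v < 256, which holds for every value A formats
def pvFormat08b (v : Nat) : String :=
  String.ofList (((List.range 8).reverse).map (fun i => if v.testBit i then '1' else '0'))

-- the for-loop accumulating `resultado`
def pvXorLoopA (clave : String) : List String → List String
  | [] => []
  | b :: rest =>
      pvFormat08b (pvIntBase2 b ^^^ pvIntBase2 clave) :: pvXorLoopA clave rest

def xor_binario (binario : String) (clave : String) : String :=
  if !(validar_binario binario) then "Error: el binario no es válido."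
  else if clave.toList.length != 8 || !(clave.toList.all pvBitChar) then
    "Error: la clave XOR debe ser de 8 bits."
  else PySem.Str.join " " (pvXorLoopA clave (PySem.Str.split₀ binario))

-- ===== PORT B =====
-- len(b) != 8 or any(c not in "01" for c in b)
def pvBadChunk (b : String) : Bool :=
  b.toList.length != 8 || b.toList.any (fun c => !(c == '0' || c == '1'))

-- B's inline validation loop: true iff some chunk triggers the early error return
def pvCheckB : List String → Bool
  | [] => false
  | b :: rest => if pvBadChunk b then true else pvCheckB rest

-- ''.join('1' if x != y else '0' for x, y in zip(b, clave))
def pvXorChunkB (b : String) (clave : String) : String :=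
  String.ofList (List.zipWith (fun x y => if x != y then '1' else '0') b.toList clave.toList)

-- body of B after `chars = binario.split()`
def pvGoB (chars : List String) (clave : String) : String :=
  if pvCheckB chars then "Error: el binario no es válido."
  else if pvBadChunk clave then "Error: la clave XOR debe ser de 8 bits."
  else PySem.Str.join " " (chars.map (fun b => pvXorChunkB b clave))

def xor_binario_alt (binario : String) (clave : String) : String :=
  pvGoB (PySem.Str.split₀ binario) clave

-- ===== PRECONDITION & SPEC =====
def Spec_xor_binario (binario : String) (clave : String) (out : String) : Prop := out = xor_binario_alt binario clave
instance (binario : String) (clave : String) (out : String) : Decidable (Spec_xor_binario binario clave out) := by unfold Spec_xor_binario; infer_instance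

-- ===== CLAIM (what is proved, stated in full; the proofs are below) =====
def Claim_equal_xor_binario : Prop := ∀ (binario : String) (clave : String), Dom_xor_binario binario clave → Spec_xor_binario binario clave (xor_binario binario clave)

-- ===== LEMMAS AND PROOFS =====

theorem any_not_eq_not_all (l : List Char) :
    l.any (fun c => !(c == '0' || c == '1')) = !(l.all pvBitChar) := by
  induction l with
  | nil => rfl
  | cons c l ih => rw [List.any_cons, List.all_cons, Bool.not_and, ih]; rfl

theorem validarLoop_eq_not_checkB (chars : List String) :
    pvValidarLoop chars = !(pvCheckB chars) := by
  induction chars with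
  | nil => rfl
  | cons b rest ih =>
      simp only [pvValidarLoop, pvCheckB, pvBadChunk, any_not_eq_not_all]
      split_ifs <;> simp_all

theorem badChunk_false (b : String) (h : pvBadChunk b = false) :
    b.toList.length = 8 ∧ b.toList.all pvBitChar = true := by
  unfold pvBadChunk at h
  rw [any_not_eq_not_all] at h
  simp only [Bool.or_eq_false_iff, bne_eq_false_iff_eq, Bool.not_eq_false'] at h
  exact h

theorem validarLoop_mem (chars : List String) (h : pvValidarLoop chars = true) :
    ∀ b ∈ chars, b.toList.length = 8 ∧ b.toList.all pvBitChar = true := by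
  induction chars with
  | nil => simp
  | cons c rest ih =>
      simp only [pvValidarLoop] at h
      by_cases hc : (c.toList.length != 8 || !c.toList.all pvBitChar) = true
      · rw [if_pos hc] at h; exact absurd h (by simp)
      · rw [if_neg hc] at h
        have hc' : pvBadChunk c = false := by
          unfold pvBadChunk
          rw [any_not_eq_not_all]
          simpa using hc
        intro b hb
        rcases List.mem_cons.mp hb with hb | hb
        · subst hb; exact badChunk_false _ hc'
        · exact ih h b hb

def pvBitv (c : Char) : Nat := if c == '1' then 1 else 0

def pvValR : List Char → Nat
  | [] => 0
  | c :: r => pvBitv c + 2 * pvValR r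

theorem bitv_lt_two (c : Char) : pvBitv c < 2 := by
  unfold pvBitv; split <;> omega

theorem valR_append (r : List Char) (c : Char) :
    pvValR (r ++ [c]) = pvValR r + pvBitv c * 2 ^ r.length := by
  induction r with
  | nil => simp [pvValR]
  | cons d r ih => simp [pvValR, ih, List.length_cons, pow_succ]; ring

theorem foldl_valR (l : List Char) (a : Nat) :
    l.foldl (fun a c => 2 * a + (if c == '1' then 1 else 0)) a
      = a * 2 ^ l.length + pvValR l.reverse := by
  induction l generalizing a with
  | nil => simp [pvValR]
  | cons c l ih =>
      simp only [List.foldl_cons, ih, List.reverse_cons, valR_append,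
        List.length_reverse, List.length_cons, pow_succ]
      show (2 * a + pvBitv c) * 2 ^ l.length + pvValR l.reverse
          = a * (2 ^ l.length * 2) + (pvValR l.reverse + pvBitv c * 2 ^ l.length)
      ring

theorem intBase2_eq (s : String) : pvIntBase2 s = pvValR s.toList.reverse := by
  unfold pvIntBase2
  rw [foldl_valR]
  simp

theorem testBit_valR (r : List Char) (i : Nat) :
    (pvValR r).testBit i = (r.getD i '0' == '1') := by
  induction r generalizing i with
  | nil => simp [pvValR]
  | cons c r ih =>
      cases i with
      | zero =>
          have h := bitv_lt_two c
          simp only [pvValR, List.getD_cons_zero, Nat.testBit_zero]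
          have h2 : (pvBitv c + 2 * pvValR r) % 2 = pvBitv c := by omega
          unfold pvBitv at *
          split <;> simp_all
      | succ i =>
          have h := bitv_lt_two c
          simp only [pvValR, List.getD_cons_succ, Nat.testBit_add_one]
          have h2 : (pvBitv c + 2 * pvValR r) / 2 = pvValR r := by omega
          rw [h2, ih]

theorem chunk_eq (l k : List Char) (hl : l.length = 8) (hk : k.length = 8)
    (al : l.all pvBitChar = true) (ak : k.all pvBitChar = true) :
    ((List.range 8).reverse).map
        (fun i => if (pvValR l.reverse ^^^ pvValR k.reverse).testBit i then '1' else '0')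
      = List.zipWith (fun x y => if x != y then '1' else '0') l k := by
  apply List.ext_getElem
  · simp [hl, hk]
  · intro j h1 h2
    simp only [List.getElem_map, List.getElem_reverse, List.length_range,
      List.getElem_range, List.getElem_zipWith]
    have hj : j < 8 := by simpa [hl, hk] using h2
    rw [Nat.testBit_xor, testBit_valR, testBit_valR]
    have egl : l.reverse.getD (8 - 1 - j) '0' = l[j]'(by omega) := by
      rw [List.getD_eq_getElem _ _ (by simp [hl]; omega), List.getElem_reverse]
      congr 1; omega
    have egk : k.reverse.getD (8 - 1 - j) '0' = k[j]'(by omega) := by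
      rw [List.getD_eq_getElem _ _ (by simp [hk]; omega), List.getElem_reverse]
      congr 1; omega
    rw [egl, egk]
    have bl : pvBitChar (l[j]'(by omega)) = true := by
      simp only [List.all_eq_true] at al; exact al _ (List.getElem_mem _)
    have bk : pvBitChar (k[j]'(by omega)) = true := by
      simp only [List.all_eq_true] at ak; exact ak _ (List.getElem_mem _)
    simp only [pvBitChar, Bool.or_eq_true, beq_iff_eq] at bl bk
    rcases bl with bl | bl <;> rcases bk with bk | bk <;> rw [bl, bk] <;> rfl

theorem xorLoop_eq (clave : String) (chars : List String)
    (hv : pvValidarLoop chars = true)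
    (hkl : clave.toList.length = 8) (hka : clave.toList.all pvBitChar = true) :
    pvXorLoopA clave chars = chars.map (fun b => pvXorChunkB b clave) := by
  induction chars with
  | nil => rfl
  | cons b rest ih =>
      have hb := validarLoop_mem _ hv b (by simp)
      have hv' : pvValidarLoop rest = true := by
        simp only [pvValidarLoop] at hv
        by_cases hbad : (b.toList.length != 8 || !b.toList.all pvBitChar) = true
        · rw [if_pos hbad] at hv; exact absurd hv (by simp)
        · rw [if_neg hbad] at hv; exact hv
      simp only [pvXorLoopA, List.map_cons, ih hv']
      congr 1
      simp only [pvFormat08b, pvXorChunkB, intBase2_eq]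
      exact congrArg String.ofList (chunk_eq b.toList clave.toList hb.1 hkl hb.2 hka)

-- ===== VERDICT (by name: the statement is the Claim_ definition above) =====
theorem xor_binario_spec : Claim_equal_xor_binario := by
  intro binario clave _
  unfold Spec_xor_binario xor_binario xor_binario_alt validar_binario pvGoB
  rw [validarLoop_eq_not_checkB, Bool.not_not]
  have hcond : (clave.toList.length != 8 || !clave.toList.all pvBitChar) = pvBadChunk clave := by
    unfold pvBadChunk
    rw [any_not_eq_not_all]
  rw [hcond]
  cases h1 : pvCheckB (PySem.Str.split₀ binario) with
  | true => simp
  | false =>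
      simp only [Bool.false_eq_true, if_false]
      cases h2 : pvBadChunk clave with
      | true => simp
      | false =>
          simp only [Bool.false_eq_true, if_false]
          have hx := badChunk_false _ h2
          have hv : pvValidarLoop (PySem.Str.split₀ binario) = true := by
            rw [validarLoop_eq_not_checkB, h1]; rfl
          rw [xorLoop_eq clave _ hv hx.1 hx.2]
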